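-- pv_equiv track=rewrite | github.com/PyaeLinn01/ET6-Programming-With-Python | 5_tdd_with_llms/exercises/repeat_character.py | repeat_character
-- ===== SOURCE A (Python) =====
-- def repeat_character(text, char, n):
--     """
--     Repeats each occurrence of a specified character in a string `n` times.
--
--     Args:
--         text (str): The input string.
--         char (str): The character to repeat.
--         n (int): The number of times to repeat the character.
--
--     Returns:
--         str: A new string with each occurrence of `char` repeated `n` times.
--
--     Raises:
--         ValueError: If `char` is not a single character or `n` is negative.
--         TypeError: If inputs are of invalid types.
--     """
--     if not isinstance(text, str):
--         raise TypeError("`text` must be a string.")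
--     if not isinstance(char, str) or len(char) != 1:
--         raise ValueError("`char` must be a single character string.")
--     if not isinstance(n, int) or n < 0:
--         raise ValueError("`n` must be a non-negative integer.")
--
--     result = ""
--     for c in text:
--         if c == char:
--             result += c * n
--         else:
--             result += c
--     return result
-- ===== SOURCE B (Python) =====
-- def repeat_character(text, char, n):
--     if not isinstance(text, str):
--         raise TypeError("`text` must be a string.")
--     if not isinstance(char, str) or len(char) != 1:
--         raise ValueError("`char` must be a single character string.")
--     if not isinstance(n, int) or n < 0:
--         raise ValueError("`n` must be a non-negative integer.")
--
--     return (char * n).join(text.split(char))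
-- ===== Notes on version B (the rewrite author's own statement) =====
-- stated objective: idiomatic
-- what changed: Replaces the per-character loop with an equality test and string concatenation by splitting the text on the character and rejoining the segments with char*n as the separator.
import Mathlib
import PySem

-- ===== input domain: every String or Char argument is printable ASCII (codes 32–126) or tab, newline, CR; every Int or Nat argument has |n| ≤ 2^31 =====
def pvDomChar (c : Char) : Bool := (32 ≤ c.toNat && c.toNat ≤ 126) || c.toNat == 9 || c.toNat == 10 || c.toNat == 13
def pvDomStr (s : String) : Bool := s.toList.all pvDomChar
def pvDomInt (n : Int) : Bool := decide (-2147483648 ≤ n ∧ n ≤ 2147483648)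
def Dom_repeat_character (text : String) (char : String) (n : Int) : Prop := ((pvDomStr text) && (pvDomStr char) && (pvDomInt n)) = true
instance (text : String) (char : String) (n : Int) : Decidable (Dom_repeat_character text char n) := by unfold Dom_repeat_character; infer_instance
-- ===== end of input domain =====

-- B replaces A's per-character accumulation loop with split-on-char / rejoin-with-(char*n); same values, idiomatic decomposition.


-- ===== PORT A =====
-- 'for c in text: result += (c * n if c == char else c)'; c == char compares the 1-char string [c] with char
def repeat_character (text : String) (char : String) (n : Int) : String :=
  String.mk (text.toList.foldl
    (fun result c =>
      result ++ (if [c] = char.toList then PySem.List.pyRepeat [c] n else [c]))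
    [])

-- ===== PORT B =====
-- '(char * n).join(text.split(char))'
def repeat_character_alt (text : String) (char : String) (n : Int) : String :=
  String.mk (PySem.Chars.join (PySem.List.pyRepeat char.toList n)
    (PySem.Chars.splitOn text.toList char.toList))

-- ===== PRECONDITION & SPEC =====
-- A raises ValueError unless char has length exactly 1 and n ≥ 0; Pre_ is exactly that.
def Pre_repeat_character (text : String) (char : String) (n : Int) : Prop :=
  char.toList.length = 1 ∧ 0 ≤ n
instance (text : String) (char : String) (n : Int) : Decidable (Pre_repeat_character text char n) := by unfold Pre_repeat_character; infer_instance

def pvWitness_repeat_character : String × String × Int := ("abcb", "b", 2)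

def Spec_repeat_character (text : String) (char : String) (n : Int) (out : String) : Prop := out = repeat_character_alt text char n
instance (text : String) (char : String) (n : Int) (out : String) : Decidable (Spec_repeat_character text char n out) := by unfold Spec_repeat_character; infer_instance

-- ===== CLAIM (what is proved, stated in full; the proofs are below) =====
def Claim_equal_repeat_character : Prop := ∀ (text : String) (char : String) (n : Int), Dom_repeat_character text char n → Pre_repeat_character text char n → Spec_repeat_character text char n (repeat_character text char n)

-- ===== LEMMAS AND PROOFS =====

-- simple structural recursion equivalent to splitOn.go for a single-char separator
def pvSplit1 (k : Char) : List Char → List Char → List (List Char)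
  | [], cur => [cur.reverse]
  | c :: rest, cur =>
    if c = k then cur.reverse :: pvSplit1 k rest []
    else pvSplit1 k rest (c :: cur)

theorem pvSplit1_ne_nil (k : Char) (l cur : List Char) : pvSplit1 k l cur ≠ [] := by
  cases l with
  | nil => simp [pvSplit1]
  | cons c rest =>
    simp only [pvSplit1]
    split <;> simp [pvSplit1_ne_nil k rest]

theorem splitOn_go_single (k : Char) :
    ∀ (fuel : Nat) (l cur : List Char) (acc : List (List Char)), l.length < fuel →
      PySem.Chars.splitOn.go [k] fuel l cur acc = acc.reverse ++ pvSplit1 k l cur := by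
  intro fuel
  induction fuel with
  | zero => intro l cur acc h; omega
  | succ fuel ih =>
    intro l cur acc h
    cases l with
    | nil => simp [PySem.Chars.splitOn.go, pvSplit1]
    | cons c rest =>
      by_cases hc : c = k
      · rw [hc]
        rw [show PySem.Chars.splitOn.go [k] (fuel+1) (k :: rest) cur acc
              = PySem.Chars.splitOn.go [k] fuel rest [] (cur.reverse :: acc) from by
            simp [PySem.Chars.splitOn.go, List.isPrefixOf]]
        rw [ih rest [] (cur.reverse :: acc) (by simp at h; omega)]
        simp [pvSplit1]
      · rw [show PySem.Chars.splitOn.go [k] (fuel+1) (c :: rest) cur acc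
              = PySem.Chars.splitOn.go [k] fuel rest (c :: cur) acc from by
            simp [PySem.Chars.splitOn.go, List.isPrefixOf, Ne.symm hc]]
        rw [ih rest (c :: cur) acc (by simp at h; omega)]
        simp [pvSplit1, hc]

theorem splitOn_single (k : Char) (cs : List Char) :
    PySem.Chars.splitOn cs [k] = pvSplit1 k cs [] := by
  unfold PySem.Chars.splitOn
  rw [splitOn_go_single k (cs.length + 1) cs [] [] (by omega)]
  simp

theorem join_pvSplit1 (k : Char) (rep : List Char) :
    ∀ (l cur : List Char),
      PySem.Chars.join rep (pvSplit1 k l cur) =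
        cur.reverse ++ l.flatMap (fun c => if c = k then rep else [c]) := by
  intro l
  induction l with
  | nil => intro cur; simp [pvSplit1, PySem.Chars.join, List.intercalate]
  | cons c rest ih =>
    intro cur
    simp only [pvSplit1]
    by_cases hc : c = k
    · rw [hc, if_pos rfl]
      obtain ⟨b, t, hbt⟩ : ∃ b t, pvSplit1 k rest [] = b :: t := by
        cases hh : pvSplit1 k rest [] with
        | nil => exact absurd hh (pvSplit1_ne_nil k rest [])
        | cons b t => exact ⟨b, t, rfl⟩
      rw [hbt, PySem.Chars.join_cons_cons, ← hbt, ih]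
      simp
    · rw [if_neg hc, ih]
      simp [hc]

theorem repeat_character_spec' (text char : String) (n : Int)
    (hpre : Pre_repeat_character text char n) :
    repeat_character text char n = repeat_character_alt text char n := by
  obtain ⟨hlen, -⟩ := hpre
  obtain ⟨k, hk⟩ : ∃ k, char.toList = [k] := by
    cases h : char.toList with
    | nil => rw [h] at hlen; simp at hlen
    | cons a t =>
      rw [h] at hlen
      simp at hlen
      exact ⟨a, by rw [hlen]⟩
  unfold repeat_character repeat_character_alt
  rw [hk, splitOn_single, join_pvSplit1]
  rw [PySem.List.foldl_append_eq_flatMap]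
  simp only [List.nil_append, List.reverse_nil]
  congr 1
  apply List.flatMap_congr
  intro c _
  by_cases hc : c = k
  · simp [hc, PySem.List.pyRepeat]
  · simp [hc]

-- ===== VERDICT (by name: the statement is the Claim_ definition above) =====
theorem repeat_character_spec : Claim_equal_repeat_character := by
  intro text char n _ hpre
  exact repeat_character_spec' text char n hpre
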